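-- pv_equiv track=rewrite | github.com/HaterYuumi/TSU-2nd-year | Algorithms_encoding/Ariffmetic_code/ll.py | calculate_cumulative_freq
-- ===== SOURCE A (Python) =====
-- def calculate_cumulative_freq(frequency):
--     total = sum(frequency.values())
--     cum_freq = {}
--     cumulative = 0
--
--     for char, freq in sorted(frequency.items()):
--         cum_freq[char] = (cumulative, cumulative + freq)
--         cumulative += freq
--
--     return cum_freq, total
-- ===== SOURCE B (Python) =====
-- def calculate_cumulative_freq(frequency):
--     items = sorted(frequency.items())
--     prefix = [0]
--     for _, f in items:
--         prefix.append(prefix[-1] + f)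
--     cum_freq = {ch: (prefix[i], prefix[i + 1]) for i, (ch, _) in enumerate(items)}
--     return cum_freq, prefix[-1]
-- ===== Notes on version B (the rewrite author's own statement) =====
-- stated objective: alternative
-- what changed: Replaces the single running-accumulator loop (plus a separate sum() for the total) by a prefix-sum table built in one pass, a dict comprehension pairing adjacent prefix boundaries by index, and total taken as the last prefix entry.
import Mathlib
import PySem

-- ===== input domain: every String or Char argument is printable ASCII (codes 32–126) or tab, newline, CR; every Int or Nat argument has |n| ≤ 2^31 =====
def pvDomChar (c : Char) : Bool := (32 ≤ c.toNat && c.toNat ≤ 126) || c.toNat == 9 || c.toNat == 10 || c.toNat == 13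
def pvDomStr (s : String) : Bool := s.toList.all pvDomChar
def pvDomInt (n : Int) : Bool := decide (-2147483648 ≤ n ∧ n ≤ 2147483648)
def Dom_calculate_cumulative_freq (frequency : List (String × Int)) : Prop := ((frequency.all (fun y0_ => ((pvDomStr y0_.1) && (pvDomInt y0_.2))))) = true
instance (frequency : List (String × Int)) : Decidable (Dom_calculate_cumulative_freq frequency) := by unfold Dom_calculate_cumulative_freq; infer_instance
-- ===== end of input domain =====

-- B replaces A's running-accumulator loop (plus a separate sum() for the total) by a prefix-sum
-- table, an index-pairing dict comprehension and total = prefix[-1]; objective: alternative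
-- decomposition, same cost.

-- ===== PORT A =====
-- frequency is a Python dict: modelled as PySem.Dict built from the association list.
def calculate_cumulative_freq (frequency : List (String × Int)) : (List (String × Int × Int)) × Int :=
  let d := PySem.Dict.ofList frequency
  let total := d.values.sum
  -- for char, freq in sorted(frequency.items()): cum_freq[char] = (cumulative, cumulative+freq); cumulative += freq
  let st := (PySem.List.sorted2 d.items (fun x => x.1) (fun x => x.2)).foldl
      (fun (st : PySem.Dict String (Int × Int) × Int) x =>
        (st.1.insert x.1 (st.2, st.2 + x.2), st.2 + x.2))
      (PySem.Dict.empty, 0)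
  (st.1.items, total)

-- ===== PORT B =====
def calculate_cumulative_freq_alt (frequency : List (String × Int)) : (List (String × Int × Int)) × Int :=
  let items := PySem.List.sorted2 (PySem.Dict.ofList frequency).items (fun x => x.1) (fun x => x.2)
  -- prefix = [0]; for _, f in items: prefix.append(prefix[-1] + f)
  let pref := items.foldl (fun p x => p ++ [PySem.List.pyGetD p (-1) 0 + x.2]) [0]
  -- {ch: (prefix[i], prefix[i+1]) for i, (ch, _) in enumerate(items)}
  -- (pyGetD is exact here: every index i, i+1 is within range of prefix, and prefix is nonempty)
  let cum := (PySem.List.enumerate items 0).foldl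
      (fun (dd : PySem.Dict String (Int × Int)) p =>
        dd.insert p.2.1 (PySem.List.pyGetD pref p.1 0, PySem.List.pyGetD pref (p.1 + 1) 0))
      PySem.Dict.empty
  (cum.items, PySem.List.pyGetD pref (-1) 0)

-- ===== PRECONDITION & SPEC =====
def Spec_calculate_cumulative_freq (frequency : List (String × Int)) (out : (List (String × Int × Int)) × Int) : Prop := out = calculate_cumulative_freq_alt frequency
instance (frequency : List (String × Int)) (out : (List (String × Int × Int)) × Int) : Decidable (Spec_calculate_cumulative_freq frequency out) := by unfold Spec_calculate_cumulative_freq; infer_instance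

-- ===== CLAIM (what is proved, stated in full; the proofs are below) =====
def Claim_equal_calculate_cumulative_freq : Prop := ∀ (frequency : List (String × Int)), Dom_calculate_cumulative_freq frequency → Spec_calculate_cumulative_freq frequency (calculate_cumulative_freq frequency)

-- ===== LEMMAS AND PROOFS =====

-- The ideal prefix-sum tail: pvScan c l = [c+f0, c+f0+f1, ...]
def pvScan (c : Int) : List (String × Int) → List Int
  | [] => []
  | x :: t => (c + x.2) :: pvScan (c + x.2) t

-- B's prefix-building loop produces exactly c :: pvScan c items (stated generally for the induction)
lemma pvPrefix_eq (items : List (String × Int)) : ∀ (q : List Int) (c : Int),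
    items.foldl (fun p x => p ++ [PySem.List.pyGetD p (-1) 0 + x.2]) (q ++ [c])
      = q ++ c :: pvScan c items := by
  induction items with
  | nil => intro q c; simp [pvScan]
  | cons x t ih =>
    intro q c
    simp only [List.foldl_cons, PySem.List.pyGetD_neg_one_append_singleton, pvScan]
    have : (q ++ [c]) ++ [c + x.2] = (q ++ [c]) ++ [c + x.2] := rfl
    rw [show (q ++ [c]) ++ [c + x.2] = (q ++ [c]) ++ [c + x.2] from rfl, ih (q ++ [c]) (c + x.2)]
    simp

-- last element of the prefix table = c + total of the frequencies
lemma pvScan_last (items : List (String × Int)) : ∀ (c : Int),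
    PySem.List.pyGetD (c :: pvScan c items) (-1) 0 = c + (items.map (·.2)).sum := by
  induction items with
  | nil =>
    intro c
    rw [PySem.List.pyGetD_neg_one]
    · simp [pvScan]
    · simp
  | cons x t ih =>
    intro c
    have h := ih (c + x.2)
    rw [PySem.List.pyGetD_neg_one] at h
    · rw [PySem.List.pyGetD_neg_one]
      · simp only [pvScan]
        rw [List.getLast_cons (by simp)]
        rw [h]
        simp; ring
      · simp
    · simp

-- indexing the prefix table gives the partial sums
lemma pvScan_getD : ∀ (j : Nat) (items : List (String × Int)) (c : Int), j ≤ items.length →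
    (c :: pvScan c items).getD j 0 = c + ((items.take j).map (·.2)).sum := by
  intro j
  induction j with
  | zero => intro items c _; simp
  | succ j ih =>
    intro items c hj
    cases items with
    | nil => simp at hj
    | cons x t =>
      simp only [pvScan, List.getD_cons_succ, List.take_succ_cons, List.map_cons, List.sum_cons]
      rw [ih t (c + x.2) (by simpa using hj)]
      ring

-- B's index-pairing dict loop equals A's accumulator dict loop, for any prefix list pre that
-- carries the partial sums at positions s, s+1, …
lemma pvDictFold_eq (items : List (String × Int)) :
    ∀ (d : PySem.Dict String (Int × Int)) (c : Int) (s : Int) (pre : List Int),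
    (∀ j : Nat, j ≤ items.length →
        PySem.List.pyGetD pre (s + (j : Int)) 0 = c + ((items.take j).map (·.2)).sum) →
    (PySem.List.enumerate items s).foldl
        (fun (dd : PySem.Dict String (Int × Int)) p =>
          dd.insert p.2.1 (PySem.List.pyGetD pre p.1 0, PySem.List.pyGetD pre (p.1 + 1) 0))
        d
      = (items.foldl (fun (st : PySem.Dict String (Int × Int) × Int) x =>
          (st.1.insert x.1 (st.2, st.2 + x.2), st.2 + x.2)) (d, c)).1 := by
  induction items with
  | nil => intro d c s pre _; simp [PySem.List.enumerate_nil]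
  | cons x t ih =>
    intro d c s pre h
    have h0 : PySem.List.pyGetD pre s 0 = c := by
      have := h 0 (by simp)
      simpa using this
    have h1 : PySem.List.pyGetD pre (s + 1) 0 = c + x.2 := by
      have := h 1 (by simp)
      simpa using this
    rw [PySem.List.enumerate_cons]
    simp only [List.foldl_cons, h0, h1]
    exact ih (d.insert x.1 (c, c + x.2)) (c + x.2) (s + 1) pre (by
      intro j hj
      have := h (j + 1) (by simpa using Nat.succ_le_succ hj)
      push_cast at this ⊢
      rw [show s + 1 + (j : Int) = s + ((j : Int) + 1) by ring, this]
      simp [List.take_succ_cons]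
      ring)

-- ===== VERDICT (by name: the statement is the Claim_ definition above) =====
theorem calculate_cumulative_freq_spec : Claim_equal_calculate_cumulative_freq := by
  intro frequency _
  unfold Spec_calculate_cumulative_freq calculate_cumulative_freq calculate_cumulative_freq_alt
  set d := PySem.Dict.ofList frequency with hd
  set items := PySem.List.sorted2 d.items (fun x => x.1) (fun x => x.2) with hitems
  have hpref : items.foldl (fun p x => p ++ [PySem.List.pyGetD p (-1) 0 + x.2]) [0]
      = 0 :: pvScan 0 items := by
    have := pvPrefix_eq items [] 0
    simpa using this
  simp only [hpref]
  refine Prod.ext ?_ ?_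
  · -- the dicts agree
    have h : ∀ j : Nat, j ≤ items.length →
        PySem.List.pyGetD (0 :: pvScan 0 items) ((0 : Int) + (j : Int)) 0
          = 0 + ((items.take j).map (·.2)).sum := by
      intro j hj
      rw [show (0 : Int) + (j : Int) = (j : Int) by ring, PySem.List.pyGetD_natCast]
      simpa using pvScan_getD j items 0 hj
    have := pvDictFold_eq items PySem.Dict.empty 0 0 (0 :: pvScan 0 items) h
    simpa using congrArg PySem.Dict.items this.symm
  · -- the totals agree
    have hsum : (items.map (·.2)).sum = (d.items.map (·.2)).sum :=
      List.Perm.sum_eq (List.Perm.map _ (PySem.List.sorted2_perm d.items _ _ _))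
    have := pvScan_last items 0
    simp only [this, hsum]
    simp [PySem.Dict.values]
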